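-- pv_equiv track=rewrite | github.com/Nunopdmp/contro_de_distribuicao_reduzido | algo.py | algo_de_busca_de_caminho_bronco
-- ===== SOURCE A (Python) =====
-- def organizar_caminho(posicoes):
--     # Organiza as posições por rua
--     ruas = {}
--     for pos in posicoes:
--         rua = pos // 100  # Identifica a rua
--         if rua not in ruas:
--             ruas[rua] = []
--         ruas[rua].append(pos)
--
--     # Ordena as ruas
--     ruas_ordenadas = sorted(ruas.keys())
--
--     caminho = []
--     sentido = True  # Define o sentido inicial (crescente)
--
--     for rua in ruas_ordenadas:
--         if sentido:
--             caminho.extend(sorted(ruas[rua]))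
--         else:
--             caminho.extend(sorted(ruas[rua], reverse=True))
--         sentido = not sentido  # Alterna o sentido para a próxima rua
--
--     return caminho
--
-- def algo_de_busca_de_caminho_bronco(fila_de_remessas):
--     """Da esquerda para direita
--     sobe a primeira rua
--     desce a segunda rua
--     assim por diante
--     """
--     caminho = []
--     remessa_temp = []
--     posicao_de_esteira = 0
--     x=0
--     for remessa in fila_de_remessas:
--         if x == 0:
--             posicao_de_esteira_inicial = remessa[0]
--             posicao_de_esteira_final = remessa[-1]
--             remessa = remessa[1:]
--             remessa = remessa [:-1]
--             remessa_temp.append(posicao_de_esteira_inicial)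
--             remessa_temp = remessa_temp + organizar_caminho(remessa)
--             remessa_temp.append(posicao_de_esteira_final)
--             caminho.append(remessa_temp)
--             remessa_temp = []
--             x=1
--         else:
--             remessa = [posicao_de_esteira_final] + remessa
--             posicao_de_esteira_inicial = remessa[0]
--             posicao_de_esteira_final = remessa[-1]
--             remessa = remessa[1:]
--             remessa = remessa [:-1]
--             remessa_temp.append(posicao_de_esteira_inicial)
--             remessa_temp = remessa_temp + organizar_caminho(remessa)
--             remessa_temp.append(posicao_de_esteira_final)
--             caminho.append(remessa_temp)
--             remessa_temp = []
--     return caminho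
-- ===== SOURCE B (Python) =====
-- def organizar_caminho(posicoes):
--     # Global sort once, then walk the sorted distinct streets, filtering each
--     # street's segment out of the sorted list; reverse every other street.
--     s = sorted(posicoes)
--     caminho = []
--     for i, rua in enumerate(sorted({p // 100 for p in posicoes})):
--         seg = [p for p in s if p // 100 == rua]
--         caminho += seg if i % 2 == 0 else seg[::-1]
--     return caminho
--
-- def algo_de_busca_de_caminho_bronco(fila_de_remessas):
--     """Da esquerda para direita
--     sobe a primeira rua
--     desce a segunda rua
--     assim por diante
--     """
--     caminho = []
--     final = None
--     for i, remessa in enumerate(fila_de_remessas):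
--         if i > 0:
--             remessa = [final] + remessa
--         inicial = remessa[0]
--         final = remessa[-1]
--         caminho.append([inicial] + organizar_caminho(remessa[1:-1]) + [final])
--     return caminho
-- ===== Notes on version B (the rewrite author's own statement) =====
-- stated objective: alternative
-- what changed: organizar_caminho now sorts the whole position list once and walks the sorted distinct streets (a set comprehension), extracting each street's already-sorted segment by filtering the globally sorted list and reversing it on odd street rank, instead of bucketing positions into a dict and sorting each bucket; the outer loop carries the previous remessa's final position as plain state via enumerate instead of the x-flag/temp-list machinery.
import Mathlib
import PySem

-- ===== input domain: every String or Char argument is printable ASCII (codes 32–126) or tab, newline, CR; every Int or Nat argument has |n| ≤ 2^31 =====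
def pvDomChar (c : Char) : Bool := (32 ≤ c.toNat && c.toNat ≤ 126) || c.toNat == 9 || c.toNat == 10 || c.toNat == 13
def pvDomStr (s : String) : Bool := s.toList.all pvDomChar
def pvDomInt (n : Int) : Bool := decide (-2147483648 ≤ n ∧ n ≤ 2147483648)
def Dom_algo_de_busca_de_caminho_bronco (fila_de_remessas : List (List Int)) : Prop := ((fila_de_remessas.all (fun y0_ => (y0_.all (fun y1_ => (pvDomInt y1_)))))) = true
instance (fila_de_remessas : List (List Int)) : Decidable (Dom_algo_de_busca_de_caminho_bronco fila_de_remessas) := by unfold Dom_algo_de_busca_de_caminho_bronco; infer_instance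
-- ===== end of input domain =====

-- B rewrites organizar_caminho as one global sort followed by a single pass over the
-- sorted distinct streets (filtering each street's segment out of the sorted list,
-- reversed on odd rank) instead of dict-bucketing then per-bucket sorting; objective: alternative.

-- pos // 100 (Python floor division), the street of a position (used by both sources)
def pvKey (p : Int) : Int := PySem.Int.floordiv p 100

-- ===== PORT A =====
-- organizar_caminho: dict bucketing ('if rua not in ruas: ruas[rua] = []' + append is
-- exactly setdefault-then-modify), then fold over sorted keys with the sentido flag.
def pvOrgA (posicoes : List Int) : List Int :=
  let ruas : PySem.Dict Int (List Int) :=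
    posicoes.foldl
      (fun d pos => (d.setdefault (pvKey pos) []).modify (pvKey pos) [] (fun l => l ++ [pos]))
      PySem.Dict.empty
  let ruas_ordenadas := PySem.List.sorted ruas.keys (fun x => x)
  (ruas_ordenadas.foldl
    (fun (st : List Int × Bool) rua =>
      ((if st.2 then st.1 ++ PySem.List.sorted (ruas.getD rua []) (fun x => x)
        else st.1 ++ PySem.List.sorted (ruas.getD rua []) (fun x => x) true), !st.2))
    ([], true)).1

-- outer loop: state (caminho, x, posicao_de_esteira_final); remessa[0] / remessa[-1]
-- as headD 0 / getLastD 0 (the remessa is nonempty wherever Python A returns — Pre_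
-- excludes an empty first remessa, where Python raises IndexError);
-- remessa[1:] then [:-1] is drop 1 then dropLast (exact for every list).
-- the loop body (named helper; state st = (caminho, x, posicao_de_esteira_final))
def pvStepA (st : List (List Int) × Int × Int) (remessa : List Int) : List (List Int) × Int × Int :=
  if st.2.1 == 0 then
    let ini := remessa.headD 0
    let fin := remessa.getLastD 0
    let meio := (remessa.drop 1).dropLast
    (st.1 ++ [[ini] ++ pvOrgA meio ++ [fin]], 1, fin)
  else
    let remessa := st.2.2 :: remessa
    let ini := remessa.headD 0
    let fin := remessa.getLastD 0
    let meio := (remessa.drop 1).dropLast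
    (st.1 ++ [[ini] ++ pvOrgA meio ++ [fin]], 1, fin)

def algo_de_busca_de_caminho_bronco (fila_de_remessas : List (List Int)) : List (List Int) :=
  (fila_de_remessas.foldl pvStepA ([], 0, 0)).1

-- ===== PORT B =====
-- organizar_caminho, B's way: sort once, enumerate the sorted distinct streets,
-- take each street's segment by filtering the sorted list (seg[::-1] = reverse).
def pvOrgAlt (posicoes : List Int) : List Int :=
  let s := PySem.List.sorted posicoes (fun x => x)
  (PySem.List.enumerate (PySem.List.sorted (PySem.Set.ofList (posicoes.map pvKey)) (fun x => x)) 0).foldl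
    (fun caminho ir =>
      let seg := s.filter (fun p => pvKey p == ir.2)
      caminho ++ (if PySem.Int.mod ir.1 2 == 0 then seg else seg.reverse))
    []

-- one row: [remessa[0]] + organizar_caminho(remessa[1:-1]) + [remessa[-1]], plus the new final
def pvRow (remessa : List Int) : List Int × Int :=
  ([remessa.headD 0] ++ pvOrgAlt ((remessa.drop 1).dropLast) ++ [remessa.getLastD 0],
   remessa.getLastD 0)

-- the i > 0 iterations: the previous final is prepended
def pvAltLoop : Int → List (List Int) → List (List Int)
  | _, [] => []
  | fin, r :: rest => (pvRow (fin :: r)).1 :: pvAltLoop (pvRow (fin :: r)).2 rest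

def algo_de_busca_de_caminho_bronco_alt (fila_de_remessas : List (List Int)) : List (List Int) :=
  match fila_de_remessas with
  | [] => []
  | r :: rest => (pvRow r).1 :: pvAltLoop (pvRow r).2 rest

-- ===== PRECONDITION & SPEC =====
-- Pre_ excludes a nonempty fila whose FIRST remessa is empty: there Python A raises
-- IndexError at remessa[0] (B raises the same way); A returns on every other input.
def Pre_algo_de_busca_de_caminho_bronco (fila_de_remessas : List (List Int)) : Prop :=
  fila_de_remessas.head? ≠ some ([] : List Int)
instance (fila_de_remessas : List (List Int)) : Decidable (Pre_algo_de_busca_de_caminho_bronco fila_de_remessas) := by unfold Pre_algo_de_busca_de_caminho_bronco; infer_instance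
def pvWitness_algo_de_busca_de_caminho_bronco : List (List Int) := [[1, 101, 3], [205, 7]]

def Spec_algo_de_busca_de_caminho_bronco (fila_de_remessas : List (List Int)) (out : List (List Int)) : Prop := out = algo_de_busca_de_caminho_bronco_alt fila_de_remessas
instance (fila_de_remessas : List (List Int)) (out : List (List Int)) : Decidable (Spec_algo_de_busca_de_caminho_bronco fila_de_remessas out) := by unfold Spec_algo_de_busca_de_caminho_bronco; infer_instance

-- ===== CLAIM (what is proved, stated in full; the proofs are below) =====
def Claim_equal_algo_de_busca_de_caminho_bronco : Prop := ∀ (fila_de_remessas : List (List Int)), Dom_algo_de_busca_de_caminho_bronco fila_de_remessas → Pre_algo_de_busca_de_caminho_bronco fila_de_remessas → Spec_algo_de_busca_de_caminho_bronco fila_de_remessas (algo_de_busca_de_caminho_bronco fila_de_remessas)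

-- ===== LEMMAS AND PROOFS =====

-- the dict-building step of A
def pvStepD (d : PySem.Dict Int (List Int)) (pos : Int) : PySem.Dict Int (List Int) :=
  (d.setdefault (pvKey pos) []).modify (pvKey pos) [] (fun l => l ++ [pos])

theorem pvGetD_stepD (d : PySem.Dict Int (List Int)) (pos k : Int) :
    (pvStepD d pos).getD k [] = if k = pvKey pos then d.getD k [] ++ [pos] else d.getD k [] := by
  unfold pvStepD
  rw [PySem.Dict.getD_modify]
  split_ifs with h
  · rw [h, PySem.Dict.getD_setdefault_self]
  · rw [PySem.Dict.getD_eq_get?_getD, PySem.Dict.get?_setdefault_of_ne _ _ h,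
      ← PySem.Dict.getD_eq_get?_getD]

theorem pvBucket (l : List Int) : ∀ (d : PySem.Dict Int (List Int)) (k : Int),
    (l.foldl pvStepD d).getD k [] = d.getD k [] ++ l.filter (fun p => pvKey p == k) := by
  induction l with
  | nil => intro d k; simp
  | cons p t ih =>
      intro d k
      simp only [List.foldl_cons, List.filter_cons, ih, pvGetD_stepD]
      by_cases h : pvKey p = k
      · simp [h]
      · have h' : ¬ k = pvKey p := fun hk => h hk.symm
        simp [h, h']

theorem pvKeys_stepD (d : PySem.Dict Int (List Int)) (pos : Int) :
    (pvStepD d pos).keys = PySem.Set.add d.keys (pvKey pos) := by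
  unfold pvStepD
  rw [PySem.Dict.keys_modify]
  by_cases hc : d.contains (pvKey pos) = true
  · rw [PySem.Dict.keys_insert_of_contains _ _ (by
      rw [PySem.Dict.contains_setdefault]; simp [hc])]
    rw [PySem.Dict.keys_setdefault]
    simp only [hc, if_true]
    have hm : pvKey pos ∈ d.keys := (PySem.Dict.contains_iff_mem_keys d (pvKey pos)).1 hc
    simp [PySem.Set.add, PySem.Set.contains, hm]
  · rw [PySem.Dict.keys_insert_of_contains _ _ (by
      rw [PySem.Dict.contains_setdefault]; simp)]
    rw [PySem.Dict.keys_setdefault]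
    simp only [hc]
    have hm : pvKey pos ∉ d.keys := fun hmem =>
      hc ((PySem.Dict.contains_iff_mem_keys d (pvKey pos)).2 hmem)
    simp [PySem.Set.add, PySem.Set.contains, hm]

theorem pvKeysFold (l : List Int) : ∀ (d : PySem.Dict Int (List Int)),
    (l.foldl pvStepD d).keys = l.foldl (fun s b => PySem.Set.add s (pvKey b)) d.keys := by
  induction l with
  | nil => intro d; rfl
  | cons p t ih => intro d; simp only [List.foldl_cons, ih, pvKeys_stepD]

theorem pvKeysOfList (l : List Int) :
    (l.foldl pvStepD PySem.Dict.empty).keys = PySem.Set.ofList (l.map pvKey) := by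
  rw [pvKeysFold, PySem.Dict.keys_empty, PySem.Set.ofList_eq_foldl, List.foldl_map]

-- filtering a (key = id) sorted list is sorting the filtered list
theorem pvFilterSorted (xs : List Int) (p : Int → Bool) :
    PySem.List.sorted (xs.filter p) (fun x => x) = (PySem.List.sorted xs (fun x => x)).filter p :=
  PySem.List.sorted_id_eq_of_perm_of_pairwise (xs.filter p)
    ((PySem.List.sorted xs (fun x => x)).filter p)
    ((PySem.List.sorted_perm xs (fun x => x) false).filter p)
    ((PySem.List.sorted_pairwise xs (fun x => x)).filter p)

-- sorted(xs, reverse=True) with the identity key is the reverse of sorted(xs)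
theorem pvSortedRev (xs : List Int) :
    PySem.List.sorted xs (fun x => x) true = (PySem.List.sorted xs (fun x => x)).reverse := by
  have h : PySem.List.sorted xs (fun x => x) = (PySem.List.sorted xs (fun x => x) true).reverse := by
    apply PySem.List.sorted_id_eq_of_perm_of_pairwise
    · exact (List.reverse_perm _).trans (PySem.List.sorted_perm xs (fun x => x) true)
    · exact (List.pairwise_reverse).2 (PySem.List.sorted_pairwise_rev xs (fun x => x))
  rw [h, List.reverse_reverse]

theorem pvModFlip (n : Int) :
    (PySem.Int.mod (n + 1) 2 == 0) = !(PySem.Int.mod n 2 == 0) := by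
  rw [PySem.Int.mod_eq_emod_of_pos (by norm_num), PySem.Int.mod_eq_emod_of_pos (by norm_num)]
  rcases Int.emod_two_eq n with h | h
  · have h1 : (n + 1) % 2 = 1 := by omega
    rw [h, h1]; decide
  · have h1 : (n + 1) % 2 = 0 := by omega
    rw [h, h1]; decide

-- the alternation: A's bool-toggling fold is B's enumerate-with-parity fold
theorem pvAltFold (seg : Int → List Int) (ks : List Int) : ∀ (n : Int) (acc : List Int),
    (PySem.List.enumerate ks n).foldl
      (fun caminho ir => caminho ++ (if PySem.Int.mod ir.1 2 == 0 then seg ir.2 else (seg ir.2).reverse)) acc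
    = (ks.foldl
        (fun (st : List Int × Bool) rua =>
          ((if st.2 then st.1 ++ seg rua else st.1 ++ (seg rua).reverse), !st.2))
        (acc, PySem.Int.mod n 2 == 0)).1 := by
  induction ks with
  | nil => intro n acc; simp [PySem.List.enumerate]
  | cons k t ih =>
      intro n acc
      rw [PySem.List.enumerate_cons]
      simp only [List.foldl_cons]
      rw [ih (n + 1), pvModFlip]
      cases hb : (PySem.Int.mod n 2 == 0) <;> simp

-- the two organizar_caminho implementations agree
theorem pvOrgEq (posicoes : List Int) : pvOrgA posicoes = pvOrgAlt posicoes := by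
  unfold pvOrgA pvOrgAlt
  simp only []
  rw [show (fun (d : PySem.Dict Int (List Int)) (pos : Int) =>
      (d.setdefault (pvKey pos) []).modify (pvKey pos) [] (fun l => l ++ [pos])) = pvStepD from rfl]
  rw [pvKeysOfList]
  have hf : (fun (st : List Int × Bool) rua =>
      ((if st.2 then st.1 ++ PySem.List.sorted ((posicoes.foldl pvStepD PySem.Dict.empty).getD rua []) (fun x => x)
        else st.1 ++ PySem.List.sorted ((posicoes.foldl pvStepD PySem.Dict.empty).getD rua []) (fun x => x) true), !st.2))
      = (fun (st : List Int × Bool) rua =>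
      ((if st.2 then st.1 ++ (PySem.List.sorted posicoes (fun x => x)).filter (fun p => pvKey p == rua)
        else st.1 ++ ((PySem.List.sorted posicoes (fun x => x)).filter (fun p => pvKey p == rua)).reverse), !st.2)) := by
    funext st rua
    have hb : (posicoes.foldl pvStepD PySem.Dict.empty).getD rua []
        = posicoes.filter (fun p => pvKey p == rua) := by
      simpa using pvBucket posicoes PySem.Dict.empty rua
    rw [hb, pvSortedRev, pvFilterSorted]
  rw [hf]
  have := (pvAltFold (fun rua => (PySem.List.sorted posicoes (fun x => x)).filter (fun p => pvKey p == rua))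
      (PySem.List.sorted (PySem.Set.ofList (posicoes.map pvKey)) (fun x => x)) 0 []).symm
  simpa using this

-- A's loop after the first iteration is pvAltLoop
theorem pvStepA_one (caminho : List (List Int)) (fin : Int) (r : List Int) :
    pvStepA (caminho, 1, fin) r = (caminho ++ [(pvRow (fin :: r)).1], 1, (pvRow (fin :: r)).2) := by
  simp [pvStepA, pvRow, pvOrgEq]

theorem pvLoopEq (rest : List (List Int)) : ∀ (caminho : List (List Int)) (fin : Int),
    (rest.foldl pvStepA (caminho, 1, fin)).1 = caminho ++ pvAltLoop fin rest := by
  induction rest with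
  | nil => intro caminho fin; simp [pvAltLoop]
  | cons r t ih =>
      intro caminho fin
      rw [List.foldl_cons, pvStepA_one, ih]
      simp [pvAltLoop]

-- ===== VERDICT (by name: the statement is the Claim_ definition above) =====
theorem algo_de_busca_de_caminho_bronco_spec : Claim_equal_algo_de_busca_de_caminho_bronco := by
  intro fila _ _
  unfold Spec_algo_de_busca_de_caminho_bronco algo_de_busca_de_caminho_bronco
    algo_de_busca_de_caminho_bronco_alt
  cases fila with
  | nil => rfl
  | cons r rest =>
      have hfirst : pvStepA ([], 0, 0) r = ([(pvRow r).1], 1, (pvRow r).2) := by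
        simp [pvStepA, pvRow, pvOrgEq]
      rw [List.foldl_cons, hfirst, pvLoopEq]
      simp
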